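-- pv_equiv track=rewrite | github.com/BENULL/LeetCode | 78.子集.py | subsets
-- ===== SOURCE A (Python) =====
-- from typing import List
--
-- def subsets(nums: List[int]) -> List[List[int]]:
--     # res = [[]]
--     # def dfs(path,i):
--     #     if i >= len(nums):
--     #         return
--     #     path.append(nums[i])
--     #     res.append(path[:])
--     #     dfs(path, i+1)
--     #     path.pop()
--     #     dfs(path, i+1)
--     # dfs([], 0)
--     # return res
--
--     # 迭代法实现子集枚举
--     res = []
--     n = len(nums)
--     for mask in range(1<<n):
--         ans = []
--         for i in range(n):
--             if mask&(1<<i):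
--                 ans.append(nums[i])
--         res.append(ans)
--     return res
-- ===== SOURCE B (Python) =====
-- from typing import List
--
-- def subsets(nums: List[int]) -> List[List[int]]:
--     res = [[]]
--     for x in nums:
--         res = res + [sub + [x] for sub in res]
--     return res
-- ===== Notes on version B (the rewrite author's own statement) =====
-- stated objective: simpler
-- what changed: Replaces A's 2^n-iteration bitmask double loop (inner scan over all n positions per mask) by incremental doubling: start from the singleton list containing the empty subset and for each element append it to every subset built so far, which yields exactly the bitmask order.
import Mathlib
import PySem

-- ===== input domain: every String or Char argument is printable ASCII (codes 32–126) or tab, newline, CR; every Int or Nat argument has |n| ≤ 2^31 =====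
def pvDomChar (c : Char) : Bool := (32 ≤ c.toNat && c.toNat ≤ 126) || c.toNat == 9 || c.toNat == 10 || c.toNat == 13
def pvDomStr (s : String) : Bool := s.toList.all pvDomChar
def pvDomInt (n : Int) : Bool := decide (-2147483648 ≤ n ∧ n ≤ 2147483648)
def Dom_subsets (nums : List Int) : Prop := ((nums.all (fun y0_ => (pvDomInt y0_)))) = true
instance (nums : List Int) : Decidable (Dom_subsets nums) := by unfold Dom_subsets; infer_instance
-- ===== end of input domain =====

-- B replaces A's 2^n × n bitmask double loop by incremental doubling (res = res + [sub+[x] …]),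
-- a simpler one-pass builder producing the same (bitmask-order) list.

-- ===== PORT A =====
-- inner loop of A: ans = []; for i in range(n): if mask & (1 << i): ans.append(nums[i])
def maskElems (nums : List Int) (mask : Nat) : List Int :=
  (List.range nums.length).foldl
    (fun ans i =>
      if mask &&& (1 <<< i) ≠ 0 then
        ans ++ [(PySem.List.pyGet? nums (i : Int)).getD 0]  -- i ∈ range(len(nums)): always in range
      else ans) []

def subsets (nums : List Int) : List (List Int) :=
  (List.range (1 <<< nums.length)).foldl (fun res mask => res ++ [maskElems nums mask]) []

-- ===== PORT B =====
def subsets_alt (nums : List Int) : List (List Int) :=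
  nums.foldl (fun res x => res ++ res.map (fun sub => sub ++ [x])) [[]]

-- ===== PRECONDITION & SPEC =====
def Spec_subsets (nums : List Int) (out : List (List Int)) : Prop := out = subsets_alt nums
instance (nums : List Int) (out : List (List Int)) : Decidable (Spec_subsets nums out) := by unfold Spec_subsets; infer_instance

-- ===== CLAIM (what is proved, stated in full; the proofs are below) =====
def Claim_equal_subsets : Prop := ∀ (nums : List Int), Dom_subsets nums → Spec_subsets nums (subsets nums)

-- ===== LEMMAS AND PROOFS =====

theorem bit_ne_iff (mask i : Nat) : (mask &&& (1 <<< i) ≠ 0) ↔ mask.testBit i := by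
  simp [Nat.one_shiftLeft, Nat.and_two_pow]

-- low bits of nums++[x] agree with nums, so the first 2^n subsets are unchanged
theorem maskElems_append_lt (nums : List Int) (x : Int) (mask : Nat)
    (h : mask < 2 ^ nums.length) :
    maskElems (nums ++ [x]) mask = maskElems nums mask := by
  unfold maskElems
  rw [List.length_append, List.length_singleton, List.range_succ, List.foldl_append]
  have hlast : ¬ (mask &&& (1 <<< nums.length) ≠ 0) := by
    rw [bit_ne_iff]
    simp [Nat.testBit_lt_two_pow h]
  simp only [List.foldl_cons, List.foldl_nil, if_neg hlast]
  apply PySem.List.foldl_congr_mem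
  intro ans i hi
  have hi' : i < nums.length := List.mem_range.mp hi
  rw [show PySem.List.pyGet? (nums ++ [x]) (i : Int) = PySem.List.pyGet? nums (i : Int) by
    simp [PySem.List.pyGet?, PySem.List.pyIdx?, hi', hi'.le]]

-- subsets with the top bit set: the same low subset with x appended at the end
theorem maskElems_append_ge (nums : List Int) (x : Int) (m : Nat)
    (h : m < 2 ^ nums.length) :
    maskElems (nums ++ [x]) (2 ^ nums.length + m) = maskElems nums m ++ [x] := by
  unfold maskElems
  rw [List.length_append, List.length_singleton, List.range_succ, List.foldl_append]
  have hlast : (2 ^ nums.length + m) &&& (1 <<< nums.length) ≠ 0 := by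
    rw [bit_ne_iff, Nat.testBit_two_pow_add_eq]
    simp [Nat.testBit_lt_two_pow h]
  simp only [List.foldl_cons, List.foldl_nil, if_pos hlast]
  rw [show PySem.List.pyGet? (nums ++ [x]) (nums.length : Int) = some x by
    simp [PySem.List.pyGet?, PySem.List.pyIdx?]]
  congr 1
  apply PySem.List.foldl_congr_mem
  intro ans i hi
  have hi' : i < nums.length := List.mem_range.mp hi
  rw [show PySem.List.pyGet? (nums ++ [x]) (i : Int) = PySem.List.pyGet? nums (i : Int) by
    simp [PySem.List.pyGet?, PySem.List.pyIdx?, hi', hi'.le]]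
  congr 2
  simp [Nat.one_shiftLeft, Nat.and_two_pow, Nat.testBit_two_pow_add_gt hi']

theorem subsets_eq_map (nums : List Int) :
    subsets nums = (List.range (1 <<< nums.length)).map (maskElems nums) := by
  unfold subsets
  rw [PySem.List.foldl_append_singleton_eq_map]
  simp

theorem main_eq (nums : List Int) : subsets nums = subsets_alt nums := by
  induction nums using List.reverseRecOn with
  | nil => decide
  | append_singleton nums x ih =>
      rw [subsets_eq_map] at ih ⊢
      unfold subsets_alt at ih ⊢
      rw [List.foldl_append, List.foldl_cons, List.foldl_nil, ← ih]
      simp only [Nat.one_shiftLeft] at *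
      rw [List.length_append, List.length_singleton,
        pow_succ, mul_two, List.range_add, List.map_append, List.map_map]
      congr 1
      · apply List.map_congr_left
        intro mask hmask
        exact maskElems_append_lt nums x mask (List.mem_range.mp hmask)
      · rw [List.map_map]
        apply List.map_congr_left
        intro m hm
        simpa using maskElems_append_ge nums x m (List.mem_range.mp hm)

-- ===== VERDICT (by name: the statement is the Claim_ definition above) =====
theorem subsets_spec : Claim_equal_subsets := by
  intro nums _
  unfold Spec_subsets
  exact main_eq nums
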